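-- pv_equiv track=rewrite | github.com/jbn/pathsjson | pathsjson/impl.py | to_dependents_list
-- ===== SOURCE A (Python) =====
-- def to_dependents_list(g):
--     deps = {}
--
--     for k, vertices in g.items():
--         for v in vertices:
--             if v not in deps:
--                 deps[v] = set()
--             deps[v].add(k)
--
--     # I do this for deterministic ordering.
--     return {k: sorted(v) for k, v in deps.items()}
-- ===== SOURCE B (Python) =====
-- def to_dependents_list(g):
--     vertices = list(dict.fromkeys(v for vs in g.values() for v in vs))
--     return {v: sorted({k for k, vs in g.items() if v in vs}) for v in vertices}
-- ===== Notes on version B (the rewrite author's own statement) =====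
-- stated objective: alternative
-- what changed: Replaces A's incremental reverse-adjacency dict of sets (insert-if-absent then add per edge, then sort each bucket) by an ordered dedup of all vertex lists followed by one per-vertex scan of g that collects and sorts the set of keys mentioning that vertex.
import Mathlib
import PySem

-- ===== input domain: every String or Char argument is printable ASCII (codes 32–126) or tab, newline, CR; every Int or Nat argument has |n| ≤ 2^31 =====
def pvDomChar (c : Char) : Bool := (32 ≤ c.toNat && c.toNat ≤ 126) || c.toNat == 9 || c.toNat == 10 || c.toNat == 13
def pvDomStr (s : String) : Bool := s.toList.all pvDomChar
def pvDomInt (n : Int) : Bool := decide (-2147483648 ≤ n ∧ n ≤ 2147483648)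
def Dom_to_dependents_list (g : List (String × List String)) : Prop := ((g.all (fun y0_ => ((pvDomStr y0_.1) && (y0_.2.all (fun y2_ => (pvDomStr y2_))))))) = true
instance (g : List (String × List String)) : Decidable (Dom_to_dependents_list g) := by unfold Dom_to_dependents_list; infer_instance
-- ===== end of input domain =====

-- B inverts the adjacency map by a dedup pass plus per-vertex scans instead of A's
-- incremental dict of sets; same return value, no speed claim (objective: alternative).

-- ===== PORT A =====
def to_dependents_list (g : List (String × List String)) : List (String × List String) :=
  let deps : PySem.Dict String (PySem.Set String) :=
    g.foldl (fun deps kv =>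
      kv.2.foldl (fun deps v =>
        let deps1 := if deps.contains v then deps else deps.insert v PySem.Set.empty
        deps1.insert v (PySem.Set.add (deps1.getD v PySem.Set.empty) kv.1)) deps)
      PySem.Dict.empty
  deps.items.map (fun p => (p.1, PySem.List.sorted p.2 (fun x => x) false))

-- ===== PORT B =====
def to_dependents_list_alt (g : List (String × List String)) : List (String × List String) :=
  let vertices := PySem.List.dedup (g.flatMap (fun p => p.2))
  vertices.map (fun v =>
    (v, PySem.List.sorted
          (PySem.Set.ofList ((g.filter (fun p => p.2.contains v)).map (fun p => p.1)))
          (fun x => x) false))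

-- ===== PRECONDITION & SPEC =====
def Spec_to_dependents_list (g : List (String × List String)) (out : List (String × List String)) : Prop := out = to_dependents_list_alt g
instance (g : List (String × List String)) (out : List (String × List String)) : Decidable (Spec_to_dependents_list g out) := by unfold Spec_to_dependents_list; infer_instance

-- ===== CLAIM (what is proved, stated in full; the proofs are below) =====
def Claim_equal_to_dependents_list : Prop := ∀ (g : List (String × List String)), Dom_to_dependents_list g → Spec_to_dependents_list g (to_dependents_list g)

-- ===== LEMMAS AND PROOFS =====

-- A's loop body (insert-empty-if-absent, then add k) is a single Dict.modify.
theorem innerstep_eq_modify (d : PySem.Dict String (PySem.Set String)) (v k : String) :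
    (let d1 := if d.contains v then d else d.insert v PySem.Set.empty
     d1.insert v (PySem.Set.add (d1.getD v PySem.Set.empty) k))
    = d.modify v PySem.Set.empty (fun s => PySem.Set.add s k) := by
  by_cases h : d.contains v = true
  · simp only [h, if_pos, PySem.Dict.modify]
  · simp only [Bool.not_eq_true] at h
    simp [h, PySem.Dict.modify, PySem.Dict.getD_insert_self,
      PySem.Dict.insert_insert_self, PySem.Dict.getD_of_not_contains d _ h]

theorem getD_inner (k x : String) :
    ∀ (vs : List String) (d : PySem.Dict String (PySem.Set String)),
    (vs.foldl (fun d v => d.modify v PySem.Set.empty (fun s => PySem.Set.add s k)) d).getD x PySem.Set.empty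
    = if vs.contains x then PySem.Set.add (d.getD x PySem.Set.empty) k
      else d.getD x PySem.Set.empty := by
  intro vs
  induction vs with
  | nil => intro d; simp
  | cons v vs ih =>
    intro d
    simp only [List.foldl_cons, ih, List.contains_cons]
    by_cases hvx : x = v
    · subst hvx
      simp [PySem.Dict.getD_modify_self]
    · rw [PySem.Dict.getD_modify_of_ne _ _ _ hvx]
      simp [hvx]

theorem getD_all (x : String) :
    ∀ (g : List (String × List String)) (d : PySem.Dict String (PySem.Set String)),
    ((g.foldl (fun d kv => kv.2.foldl (fun d v => d.modify v PySem.Set.empty (fun s => PySem.Set.add s kv.1)) d) d).getD x PySem.Set.empty)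
    = PySem.Set.update (d.getD x PySem.Set.empty) ((g.filter (fun p => p.2.contains x)).map (fun p => p.1)) := by
  intro g
  induction g with
  | nil => intro d; simp [PySem.Set.update]
  | cons kv g ih =>
    intro d
    simp only [List.foldl_cons, ih, getD_inner, List.filter_cons]
    by_cases hx : x ∈ kv.2
    · have hc : kv.2.contains x = true := by simpa using hx
      simp [hx, PySem.Set.update_cons]
    · have hc : kv.2.contains x = false := by simpa using hx
      simp [hx]

theorem keys_inner (k : String) (vs : List String) (d : PySem.Dict String (PySem.Set String)) :
    (vs.foldl (fun d v => d.modify v PySem.Set.empty (fun s => PySem.Set.add s k)) d).keys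
    = PySem.Set.update d.keys vs :=
  PySem.Dict.keys_foldl_modify vs PySem.Set.empty (fun _ _ s => PySem.Set.add s k) d

theorem keys_all :
    ∀ (g : List (String × List String)) (d : PySem.Dict String (PySem.Set String)),
    (g.foldl (fun d kv => kv.2.foldl (fun d v => d.modify v PySem.Set.empty (fun s => PySem.Set.add s kv.1)) d) d).keys
    = PySem.Set.update d.keys (g.flatMap (fun p => p.2)) := by
  intro g
  induction g with
  | nil => intro d; simp [PySem.Set.update]
  | cons kv g ih =>
    intro d
    simp only [List.foldl_cons, ih, keys_inner, List.flatMap_cons, PySem.Set.update_append]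

theorem to_dependents_list_eq_alt (g : List (String × List String)) :
    to_dependents_list g = to_dependents_list_alt g := by
  unfold to_dependents_list to_dependents_list_alt
  simp only [innerstep_eq_modify]
  set D := g.foldl (fun d kv => kv.2.foldl (fun d v => d.modify v PySem.Set.empty (fun s => PySem.Set.add s kv.1)) d) PySem.Dict.empty with hD
  have hkeys : D.keys = PySem.List.dedup (g.flatMap (fun p => p.2)) := by
    rw [hD, keys_all]
    simp [PySem.Set.update_nil_left]
  have hnd : D.keys.Nodup := by
    rw [hkeys]; simp [PySem.List.dedup_eq_ofList, PySem.Set.nodup_ofList]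
  rw [PySem.Dict.items_eq_map_keys D hnd PySem.Set.empty, hkeys, List.map_map]
  apply List.map_congr_left
  intro v _
  simp only [Function.comp]
  congr 1
  rw [hD, getD_all]
  simp [PySem.Set.update_nil_left]

-- ===== VERDICT (by name: the statement is the Claim_ definition above) =====
theorem to_dependents_list_spec : Claim_equal_to_dependents_list := by
  intro g _
  unfold Spec_to_dependents_list
  exact to_dependents_list_eq_alt g
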